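-- pv_equiv track=rewrite | github.com/mrubio-chavarria/boolean_networks | stp/algorithms.py | swap_vars_by_order
-- ===== SOURCE A (Python) =====
-- def swap_vars_by_order(expressions, f, logic):
--     k = logic
--     v = [idx[0] + 1 for idx in enumerate(f) if idx[1] == 0]
--     expressions1 = [expressions[i-1] for i in v]
--     f1 = [f[i-1] for i in v]
--     positions = [u for u in range(0, len(f)) if u not in [c - 1 for c in v]]
--     expressions = [expressions[pos] for pos in positions]
--     f = [f[pos] for pos in positions]
--     ln = 0
--     m = [0]
--     n = 0
--     for s in range(1, max(f)+1):
--         t = [idx[0] + 1 for idx in enumerate(f) if idx[1] == s]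
--         l = len(t)
--         for i in range(1, l+1):
--             for j in range(t[i-1]-1, ln+i-1, -1):
--                 n = n+1
--                 if j == 1:
--                     if n == 1:
--                         zeros = [0]
--                     else:
--                         zeros = [0 for i in range(0, n)]
--                     zeros[0:len(m)] = [m[i] for i in range(0, len(m))]
--                     m = zeros
--                     m[n-1] = f'lwij({k})'
--                 elif j == 2:
--                     if n == 1:
--                         zeros = [0]
--                     else:
--                         zeros = [0 for i in range(0, n)]
--                     zeros[0:len(m)] = [m[i] for i in range(0, len(m))]
--                     m = zeros
--                     m[n-1] = f'(leye({logic})+lwij({k}))'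
--                 else:
--                     if n == 1:
--                         zeros = [0]
--                     else:
--                         zeros = [0 for i in range(0, n)]
--                     zeros[0:len(m)] = [m[i] for i in range(0, len(m))]
--                     m = zeros
--                     m[n-1] = f'(leye({k}^{j-1})+lwij({k}))'
--                 temp1 = f[j-1]
--                 f[j - 1] = f[j]
--                 f[j] = temp1
--                 temp2 = expressions[j-1]
--                 expressions[j-1] = expressions[j]
--                 expressions[j] = temp2
--         ln += l
--     k = len(f1)
--     expressions1[k:k+n] = m
--     expressions1[k + n: k + n + ln] = expressions
--     f1 = [item for sublist in [f1, [0 for i in range(0, n)], f] for item in sublist]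
--     return expressions1, f1
-- ===== SOURCE B (Python) =====
-- def swap_vars_by_order(expressions, f, logic):
--     # Analytic version: the swap-string sequence is computed from occurrence
--     # positions in a logically reordered array (no physical bubbling), and the
--     # reordered tail is built by bucketing the nonzero entries by order value.
--     k = logic
--     zeros_exprs = [e for e, val in zip(expressions, f) if val == 0]
--     nz = [(e, val) for e, val in zip(expressions, f) if val != 0]
--     g = [val for _, val in nz]
--
--     def swap_str(j):
--         if j == 1:
--             return f'lwij({k})'
--         if j == 2:
--             return f'(leye({logic})+lwij({k}))'
--         return f'(leye({k}^{j - 1})+lwij({k}))'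
--
--     m = []
--     ln = 0
--     buckets = []
--     for s in range(1, max(g) + 1):
--         rem = [pair for pair in nz if not (1 <= pair[1] < s)]
--         pos = [p for p, pair in enumerate(rem) if pair[1] == s]
--         for i, p in enumerate(pos, 1):
--             for j in range(ln + p, ln + i - 1, -1):
--                 m.append(swap_str(j))
--         buckets += [pair for pair in rem if pair[1] == s]
--         ln += len(pos)
--     n = len(m)
--
--     tail = buckets + [pair for pair in nz if pair[1] < 1]
--     exprs = zeros_exprs + m + [e for e, _ in tail]
--     f1 = [0] * len(zeros_exprs) + [0] * n + [val for _, val in tail]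
--     return exprs, f1
-- ===== Notes on version B (the rewrite author's own statement) =====
-- stated objective: alternative
-- what changed: B computes the swap-string sequence analytically from occurrence positions in a logically reordered array and builds the reordered tail by bucketing per order value, instead of A's physical bubble-style in-place swapping which reallocates and copies the whole m-list on every single swap.
-- outside the precondition, e.g. on swap_vars_by_order(['a'], [-1], 2): A returns (['a', 0], [-1]), B returns (['a'], [-1]); on swap_vars_by_order(['a'], [], 2): A raises ValueError, B raises ValueError; on swap_vars_by_order([], [1], 2): A raises IndexError, B raises ValueError
import Mathlib
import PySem

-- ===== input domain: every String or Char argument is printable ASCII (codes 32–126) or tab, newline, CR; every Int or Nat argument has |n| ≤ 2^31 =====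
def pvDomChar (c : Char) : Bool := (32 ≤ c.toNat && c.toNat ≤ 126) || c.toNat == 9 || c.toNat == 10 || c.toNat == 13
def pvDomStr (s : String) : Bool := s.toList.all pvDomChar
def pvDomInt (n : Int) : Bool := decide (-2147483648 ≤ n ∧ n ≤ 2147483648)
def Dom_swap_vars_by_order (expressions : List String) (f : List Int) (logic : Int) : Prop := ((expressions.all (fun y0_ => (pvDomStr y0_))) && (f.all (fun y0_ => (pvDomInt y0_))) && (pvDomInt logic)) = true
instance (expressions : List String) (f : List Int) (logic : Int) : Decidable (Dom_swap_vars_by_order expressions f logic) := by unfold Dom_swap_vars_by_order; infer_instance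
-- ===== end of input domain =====

-- B replaces A's in-place bubbling (which copies the whole m-list at every swap) with an
-- analytic computation of the swap-string sequence plus per-order bucketing; measured faster.


-- ===== PORT A =====
-- Loop state of A's main loop: (expressions, f, ln, m, n).
structure PvStA where
  es : List String
  fs : List Int
  ln : Int
  m : List String
  n : Int
deriving Repr

-- One swap of A's innermost loop (body of 'for j in range(t[i-1]-1, ln+i-1, -1)').
-- Python's integer placeholder 0 inside 'm'/'zeros' is modeled as "": under Pre_ it
-- is proved never to reach the returned value.
def pvStepA (k logic : Int) (st : PvStA) (j : Int) : PvStA :=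
  let n := st.n + 1
  let m :=
    if j == 1 then
      let zeros := if n == 1 then [("" : String)] else (PySem.List.pyRange 0 n).map (fun _ => ("" : String))
      -- zeros[0:len(m)] = [m[i] for i in range(0, len(m))]  (slice assignment at index 0, hand-ported: copy ++ rest; exact, bounds ≥ 0 and drop clamps like Python)
      let cp := (PySem.List.pyRange 0 (st.m.length : Int)).map (fun i => PySem.List.pyGetD st.m i "")
      let zeros := cp ++ zeros.drop cp.length
      let m := zeros
      PySem.List.pySetD m (n - 1) ("lwij(" ++ PySem.Int.toStr k ++ ")")
    else if j == 2 then
      let zeros := if n == 1 then [("" : String)] else (PySem.List.pyRange 0 n).map (fun _ => ("" : String))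
      let cp := (PySem.List.pyRange 0 (st.m.length : Int)).map (fun i => PySem.List.pyGetD st.m i "")
      let zeros := cp ++ zeros.drop cp.length
      let m := zeros
      PySem.List.pySetD m (n - 1) ("(leye(" ++ PySem.Int.toStr logic ++ ")+lwij(" ++ PySem.Int.toStr k ++ "))")
    else
      let zeros := if n == 1 then [("" : String)] else (PySem.List.pyRange 0 n).map (fun _ => ("" : String))
      let cp := (PySem.List.pyRange 0 (st.m.length : Int)).map (fun i => PySem.List.pyGetD st.m i "")
      let zeros := cp ++ zeros.drop cp.length
      let m := zeros
      PySem.List.pySetD m (n - 1) ("(leye(" ++ PySem.Int.toStr k ++ "^" ++ PySem.Int.toStr (j - 1) ++ ")+lwij(" ++ PySem.Int.toStr k ++ "))")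
  let temp1 := PySem.List.pyGetD st.fs (j - 1) 0
  let fs := PySem.List.pySetD st.fs (j - 1) (PySem.List.pyGetD st.fs j 0)
  let fs := PySem.List.pySetD fs j temp1
  let temp2 := PySem.List.pyGetD st.es (j - 1) ""
  let es := PySem.List.pySetD st.es (j - 1) (PySem.List.pyGetD st.es j "")
  let es := PySem.List.pySetD es j temp2
  { es := es, fs := fs, ln := st.ln, m := m, n := n }

-- Body of A's 'for s in range(1, max(f)+1)'.
def pvOuterA (k logic : Int) (st : PvStA) (s : Int) : PvStA :=
  let t := ((PySem.List.enumerate st.fs).filter (fun idx => idx.2 == s)).map (fun idx => idx.1 + 1)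
  let l : Int := (t.length : Int)
  let st2 := (PySem.List.pyRange 1 (l + 1)).foldl (fun stI i =>
      (PySem.List.pyRange (PySem.List.pyGetD t (i - 1) 0 - 1) (stI.ln + i - 1) (-1)).foldl (pvStepA k logic) stI) st
  { st2 with ln := st2.ln + l }

def swap_vars_by_order (expressions : List String) (f : List Int) (logic : Int) : List String × List Int :=
  let k := logic
  let v := ((PySem.List.enumerate f).filter (fun idx => idx.2 == 0)).map (fun idx => idx.1 + 1)
  let expressions1 := v.map (fun i => PySem.List.pyGetD expressions (i - 1) "")
  let f1 := v.map (fun i => PySem.List.pyGetD f (i - 1) 0)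
  let positions := (PySem.List.pyRange 0 (f.length : Int)).filter (fun u => !((v.map (fun c => c - 1)).contains u))
  let expressions2 := positions.map (fun pos => PySem.List.pyGetD expressions pos "")
  let f2 := positions.map (fun pos => PySem.List.pyGetD f pos 0)
  -- max(f): ValueError on an empty list is excluded by Pre_; ported with default 0
  let mx := (PySem.List.max? f2 (fun x => x)).getD 0
  let st := (PySem.List.pyRange 1 (mx + 1)).foldl (pvOuterA k logic)
              { es := expressions2, fs := f2, ln := 0, m := [""], n := 0 }
  let kk : Int := (f1.length : Int)
  -- expressions1[kk:kk+n] = m  (slice assignment, hand-ported as take/++/drop; exact: kk, n ≥ 0 and take/drop clamp like Python)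
  let expressions1 := expressions1.take kk.toNat ++ st.m ++ expressions1.drop (kk + st.n).toNat
  -- expressions1[kk+n : kk+n+ln] = expressions  (same hand-ported slice assignment)
  let expressions1 := expressions1.take (kk + st.n).toNat ++ st.es ++ expressions1.drop (kk + st.n + st.ln).toNat
  let f1 := f1 ++ (PySem.List.pyRange 0 st.n).map (fun _ => (0 : Int)) ++ st.fs
  (expressions1, f1)

-- ===== PORT B =====
-- Loop state of B's single loop: (m, ln, buckets).
structure PvStB where
  m : List String
  ln : Int
  buckets : List (String × Int)
deriving Repr

def pvSwapStr (k logic j : Int) : String :=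
  if j == 1 then "lwij(" ++ PySem.Int.toStr k ++ ")"
  else if j == 2 then "(leye(" ++ PySem.Int.toStr logic ++ ")+lwij(" ++ PySem.Int.toStr k ++ "))"
  else "(leye(" ++ PySem.Int.toStr k ++ "^" ++ PySem.Int.toStr (j - 1) ++ ")+lwij(" ++ PySem.Int.toStr k ++ "))"

def pvOuterB (nz : List (String × Int)) (k logic : Int) (st : PvStB) (s : Int) : PvStB :=
  let rem := nz.filter (fun p => !(decide (1 ≤ p.2) && decide (p.2 < s)))
  let pos := ((PySem.List.enumerate rem).filter (fun q => q.2.2 == s)).map (fun q => q.1)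
  let m := (PySem.List.enumerate pos 1).foldl (fun mm ip =>
      mm ++ (PySem.List.pyRange (st.ln + ip.2) (st.ln + ip.1 - 1) (-1)).map (fun j => pvSwapStr k logic j)) st.m
  let buckets := st.buckets ++ rem.filter (fun p => p.2 == s)
  { m := m, ln := st.ln + (pos.length : Int), buckets := buckets }

def swap_vars_by_order_alt (expressions : List String) (f : List Int) (logic : Int) : List String × List Int :=
  let k := logic
  let zerosExprs := ((expressions.zip f).filter (fun p => p.2 == 0)).map (fun p => p.1)
  let nz := (expressions.zip f).filter (fun p => !(p.2 == 0))
  let g := nz.map (fun p => p.2)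
  -- max(g): ValueError on an empty list is excluded by Pre_; ported with default 0
  let st := (PySem.List.pyRange 1 ((PySem.List.max? g (fun x => x)).getD 0 + 1)).foldl
      (pvOuterB nz k logic) { m := [], ln := 0, buckets := [] }
  let n : Int := (st.m.length : Int)
  let tail := st.buckets ++ nz.filter (fun p => decide (p.2 < 1))
  (zerosExprs ++ st.m ++ tail.map (fun p => p.1),
   PySem.List.pyRepeat [(0 : Int)] (zerosExprs.length : Int) ++ PySem.List.pyRepeat [(0 : Int)] n ++ tail.map (fun p => p.2))

-- ===== PRECONDITION & SPEC =====
-- Pre_ excludes: (a) len(f) > len(expressions), where A raises IndexError; (b) f without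
-- a positive entry, where A either raises ValueError (max of the empty nonzero list) or —
-- when some nonzero (necessarily negative) entries exist — returns the untouched integer
-- placeholder 0 inside the expressions list, which is not a value of type List String.
def Pre_swap_vars_by_order (expressions : List String) (f : List Int) (logic : Int) : Prop :=
  f.length ≤ expressions.length ∧ ∃ x ∈ f, 0 < x
instance (expressions : List String) (f : List Int) (logic : Int) : Decidable (Pre_swap_vars_by_order expressions f logic) := by unfold Pre_swap_vars_by_order; infer_instance

def pvWitness_swap_vars_by_order : List String × List Int × Int := (["a", "b", "c"], [0, 2, 1], 3)

def Spec_swap_vars_by_order (expressions : List String) (f : List Int) (logic : Int) (out : List String × List Int) : Prop := out = swap_vars_by_order_alt expressions f logic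
instance (expressions : List String) (f : List Int) (logic : Int) (out : List String × List Int) : Decidable (Spec_swap_vars_by_order expressions f logic out) := by unfold Spec_swap_vars_by_order; infer_instance

-- ===== CLAIM (what is proved, stated in full; the proofs are below) =====
def Claim_equal_swap_vars_by_order : Prop := ∀ (expressions : List String) (f : List Int) (logic : Int), Dom_swap_vars_by_order expressions f logic → Pre_swap_vars_by_order expressions f logic → Spec_swap_vars_by_order expressions f logic (swap_vars_by_order expressions f logic)

-- ===== LEMMAS AND PROOFS =====

theorem pvCore {α β : Type} (p : β → Bool) (dE : α) (dF : β) :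
    ∀ (fs : List β) (es : List α), fs.length ≤ es.length →
    ((List.range fs.length).filter (fun n => p (fs.getD n dF))).map
        (fun n => (es.getD n dE, fs.getD n dF))
      = (es.zip fs).filter (fun q => p q.2) := by
  intro fs
  induction fs with
  | nil => intro es h; simp
  | cons b fs ih =>
    intro es h
    cases es with
    | nil => simp at h
    | cons e es =>
      have key : (((List.range fs.length).map Nat.succ).filter
            (fun n => p ((b :: fs).getD n dF))).map
            (fun n => ((e :: es).getD n dE, (b :: fs).getD n dF))
          = (es.zip fs).filter (fun q => p q.2) := by
        rw [List.filter_map, List.map_map]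
        simpa [Function.comp_def] using ih es (by simpa using h)
      by_cases hp : p b
      · simp only [List.length_cons, List.range_succ_eq_map, List.filter_cons,
          List.getD_cons_zero, hp, if_pos, List.map_cons, List.zip_cons_cons, key]
      · simp only [List.length_cons, List.range_succ_eq_map, List.filter_cons,
          List.getD_cons_zero, hp, Bool.false_eq_true, if_false, List.zip_cons_cons, key]

theorem pvCoreFst {α β : Type} (p : β → Bool) (dE : α) (dF : β) (fs : List β) (es : List α)
    (h : fs.length ≤ es.length) :
    ((List.range fs.length).filter (fun n => p (fs.getD n dF))).map (fun n => es.getD n dE)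
      = ((es.zip fs).filter (fun q => p q.2)).map (fun q => q.1) := by
  have := congrArg (List.map Prod.fst) (pvCore p dE dF fs es h)
  simpa [List.map_map, Function.comp_def] using this

theorem pvCoreSnd {α β : Type} (p : β → Bool) (dE : α) (dF : β) (fs : List β) (es : List α)
    (h : fs.length ≤ es.length) :
    ((List.range fs.length).filter (fun n => p (fs.getD n dF))).map (fun n => fs.getD n dF)
      = ((es.zip fs).filter (fun q => p q.2)).map (fun q => q.2) := by
  have := congrArg (List.map Prod.snd) (pvCore p dE dF fs es h)
  simpa [List.map_map, Function.comp_def] using this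

-- closed form of A's v-list
theorem pvVClosed (fs : List Int) :
    ((PySem.List.enumerate fs).filter (fun idx => idx.2 == 0)).map (fun idx => idx.1 + 1)
      = ((List.range fs.length).filter (fun n => fs.getD n 0 == 0)).map (fun (n : Nat) => ((n : Int) + 1)) := by
  rw [PySem.List.enumerate_eq_map_pyRange (d := 0), List.filter_map, List.map_map]
  rw [show PySem.List.len fs = ((fs.length : Nat) : Int) from by simp [PySem.List.len_eq],
    PySem.List.pyRange_zero_natCast, List.filter_map, List.map_map]
  simp only [Function.comp_def, PySem.List.pyGetD_natCast]

-- shifting the (+1)-indices back through pyGetD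
theorem pvShift {α : Type} (es : List α) (d : α) (L : List Nat) :
    (L.map (fun (n : Nat) => ((n : Int) + 1))).map (fun i => PySem.List.pyGetD es (i - 1) d)
      = L.map (fun n => es.getD n d) := by
  rw [List.map_map]
  apply List.map_congr_left
  intro n _
  show PySem.List.pyGetD es ((n : Int) + 1 - 1) d = es.getD n d
  rw [show ((n : Int) + 1 - 1) = (n : Int) from by ring]
  simp

theorem pvShift0 {α : Type} (es : List α) (d : α) (L : List Nat) :
    (L.map (fun (n : Nat) => (n : Int))).map (fun i => PySem.List.pyGetD es i d)
      = L.map (fun n => es.getD n d) := by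
  rw [List.map_map]
  apply List.map_congr_left
  intro n _
  simp [Function.comp_def]

theorem pvPositionsClosed (fs : List Int) :
    (PySem.List.pyRange 0 (fs.length : Int)).filter
        (fun u => !(((((List.range fs.length).filter (fun n => fs.getD n 0 == 0)).map
            (fun (n : Nat) => ((n : Int) + 1))).map (fun c => c - 1)).contains u))
      = ((List.range fs.length).filter (fun n => !(fs.getD n 0 == 0))).map (fun (n : Nat) => (n : Int)) := by
  rw [PySem.List.pyRange_zero_natCast, List.filter_map]
  congr 1
  apply List.filter_congr
  intro n hn
  simp only [List.mem_range] at hn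
  simp only [Function.comp_def, List.map_map]
  have : ((((List.range fs.length).filter (fun n => fs.getD n 0 == 0)).map
      (fun (x : Nat) => ((x : Int) + 1 - 1))).contains ((n : Nat) : Int))
      = (fs.getD n 0 == 0) := by
    rw [show (fun (x : Nat) => ((x : Int) + 1 - 1)) = (fun (x : Nat) => (x : Int)) from by
      funext x; ring]
    rw [List.contains_eq_mem, Bool.eq_iff_iff]
    simp only [decide_eq_true_eq, beq_iff_eq, List.mem_map, List.mem_filter, List.mem_range]
    constructor
    · rintro ⟨m, ⟨-, hm⟩, hcast⟩
      have hmn : m = n := by exact_mod_cast hcast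
      subst hmn
      simpa using hm
    · intro h0
      exact ⟨n, ⟨hn, by simpa using h0⟩, rfl⟩
  rw [this]

def pvPad (l : List String) : List String := if l = [] then [""] else l

theorem pvSwapAt {α : Type} (L : List α) (y x : α) (W : List α) (d : α) :
    PySem.List.pySetD
      (PySem.List.pySetD (L ++ y :: x :: W) (((L.length : Int) + 1) - 1)
        (PySem.List.pyGetD (L ++ y :: x :: W) ((L.length : Int) + 1) d))
      ((L.length : Int) + 1)
      (PySem.List.pyGetD (L ++ y :: x :: W) (((L.length : Int) + 1) - 1) d)
    = L ++ x :: y :: W := by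
  have h1 : ((L.length : Int) + 1 - 1) = ((L.length : Nat) : Int) := by ring
  have h2 : ((L.length : Int) + 1) = ((L.length + 1 : Nat) : Int) := by push_cast; ring
  rw [h1, h2]
  simp only [PySem.List.pySetD_natCast, PySem.List.pyGetD_natCast]
  rw [List.getD_append_right _ _ _ _ le_rfl, List.getD_append_right _ _ _ _ (by omega)]
  simp only [Nat.sub_self, show L.length + 1 - L.length = 1 from by omega]
  simp only [List.getD_cons_zero, List.getD_cons_succ]
  rw [List.set_append]
  simp only [lt_irrefl, if_false, Nat.sub_self, List.set_cons_zero]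
  rw [List.set_append]
  simp only [show ¬ (L.length + 1 < L.length) from by omega, if_false,
    show L.length + 1 - L.length = 1 from by omega]
  simp

theorem pvDance (mS : List String) (str : String) :
    (PySem.List.pySetD
      (((PySem.List.pyRange 0 (((pvPad mS).length : Int))).map (fun i => PySem.List.pyGetD (pvPad mS) i "")) ++
        (if ((mS.length : Int) + 1) == 1 then [("" : String)]
         else (PySem.List.pyRange 0 ((mS.length : Int) + 1)).map (fun _ => ("" : String))).drop
          (((PySem.List.pyRange 0 (((pvPad mS).length : Int))).map (fun i => PySem.List.pyGetD (pvPad mS) i "")).length))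
      (((mS.length : Int) + 1) - 1) str)
    = mS ++ [str] := by
  have hcp : ((PySem.List.pyRange 0 (((pvPad mS).length : Int))).map
      (fun i => PySem.List.pyGetD (pvPad mS) i "")) = pvPad mS := by
    simpa using PySem.List.map_pyGetD_pyRange_zero (pvPad mS) ""
  rw [hcp]
  cases mS with
  | nil =>
    simp [pvPad, PySem.List.pySetD, PySem.List.pySet?, PySem.List.pyIdx?]
  | cons a l =>
    have hne : ((((a :: l).length : Int) + 1) == 1) = false := by
      simp only [List.length_cons]
      rw [beq_eq_false_iff_ne]
      push_cast
      omega
    rw [hne, if_neg (by simp)]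
    have hpad : pvPad (a :: l) = a :: l := by simp [pvPad]
    rw [hpad]
    have hzeros : (PySem.List.pyRange 0 (((a :: l).length : Int) + 1)).map (fun _ => ("" : String))
        = List.replicate ((a :: l).length + 1) "" := by
      rw [show (((a :: l).length : Int) + 1) = (((a :: l).length + 1 : Nat) : Int) from by push_cast; ring,
        PySem.List.pyRange_zero_natCast, List.map_map]
      refine List.eq_replicate_iff.mpr ⟨by simp, ?_⟩
      intro b hb
      rcases List.mem_map.mp hb with ⟨kk, -, rfl⟩
      rfl
    rw [hzeros, List.drop_replicate]
    have h1 : (((a :: l).length : Int) + 1 - 1) = (((a :: l).length : Nat) : Int) := by ring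
    rw [h1, PySem.List.pySetD_natCast, List.set_append]
    simp only [lt_irrefl, if_false, Nat.sub_self]
    rw [show (a :: l).length + 1 - (a :: l).length = 1 from by omega]
    simp

theorem pvStepA_eq (k logic ln : Int) (L : List (String × Int)) (y x : String × Int)
    (W : List (String × Int)) (mS : List String) :
    pvStepA k logic
      { es := (L ++ y :: x :: W).map Prod.fst, fs := (L ++ y :: x :: W).map Prod.snd,
        ln := ln, m := pvPad mS, n := (mS.length : Int) } ((L.length : Int) + 1)
    = { es := (L ++ x :: y :: W).map Prod.fst, fs := (L ++ x :: y :: W).map Prod.snd,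
        ln := ln, m := pvPad (mS ++ [pvSwapStr k logic ((L.length : Int) + 1)]),
        n := (mS.length : Int) + 1 } := by
  have hpadapp : pvPad (mS ++ [pvSwapStr k logic ((L.length : Int) + 1)])
      = mS ++ [pvSwapStr k logic ((L.length : Int) + 1)] := by simp [pvPad]
  have hes := pvSwapAt (L.map Prod.fst) y.1 x.1 (W.map Prod.fst) ""
  have hfs := pvSwapAt (L.map Prod.snd) y.2 x.2 (W.map Prod.snd) 0
  simp only [List.length_map] at hes hfs
  have hmapf : (L ++ y :: x :: W).map Prod.fst = L.map Prod.fst ++ y.1 :: x.1 :: W.map Prod.fst := by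
    simp
  have hmaps : (L ++ y :: x :: W).map Prod.snd = L.map Prod.snd ++ y.2 :: x.2 :: W.map Prod.snd := by
    simp
  have hmapf' : (L ++ x :: y :: W).map Prod.fst = L.map Prod.fst ++ x.1 :: y.1 :: W.map Prod.fst := by
    simp
  have hmaps' : (L ++ x :: y :: W).map Prod.snd = L.map Prod.snd ++ x.2 :: y.2 :: W.map Prod.snd := by
    simp
  rw [pvStepA, hmapf, hmaps, hmapf', hmaps', hpadapp]
  simp only []
  rw [pvDance mS ("lwij(" ++ PySem.Int.toStr k ++ ")"),
    pvDance mS ("(leye(" ++ PySem.Int.toStr logic ++ ")+lwij(" ++ PySem.Int.toStr k ++ "))"),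
    pvDance mS ("(leye(" ++ PySem.Int.toStr k ++ "^" ++ PySem.Int.toStr (((L.length : Int) + 1) - 1)
      ++ ")+lwij(" ++ PySem.Int.toStr k ++ "))")]
  split_ifs with h1 h2
  · rw [PvStA.mk.injEq]
    exact ⟨hes, hfs, rfl, by simp [pvSwapStr, h1], rfl⟩
  · rw [PvStA.mk.injEq]
    exact ⟨hes, hfs, rfl, by simp [pvSwapStr, h1, h2], rfl⟩
  · rw [PvStA.mk.injEq]
    exact ⟨hes, hfs, rfl, by simp [pvSwapStr, h1, h2], rfl⟩

-- decomposition of a list into (gap, occurrence) segments w.r.t. a predicate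
def pvSegs (p : (String × Int) → Bool) :
    List (String × Int) → (List (List (String × Int) × (String × Int)) × List (String × Int))
  | [] => ([], [])
  | q :: R =>
    let r := pvSegs p R
    if p q then (([], q) :: r.1, r.2)
    else
      match r with
      | ([], last) => ([], q :: last)
      | ((g, y) :: rest, last) => ((q :: g, y) :: rest, last)

def pvBody : List (List (String × Int) × (String × Int)) → List (String × Int) :=
  fun segs => segs.flatMap (fun gx => gx.1 ++ [gx.2])

def pvPosList : Int → List (List (String × Int) × (String × Int)) → List Int
  | _, [] => []
  | base, (g, _) :: segs => (base + g.length + 1) :: pvPosList (base + g.length + 1) segs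

def pvStrs (k logic : Int) : Int → Int → List (List (String × Int) × (String × Int)) → List String
  | _, _, [] => []
  | base, d, (g, _) :: segs =>
      (PySem.List.pyRange (base + (g.length : Int)) d (-1)).map (pvSwapStr k logic)
      ++ pvStrs k logic (base + g.length + 1) (d + 1) segs

theorem pvSegs_body (p : (String × Int) → Bool) :
    ∀ R : List (String × Int), pvBody (pvSegs p R).1 ++ (pvSegs p R).2 = R := by
  intro R
  induction R with
  | nil => simp [pvSegs, pvBody]
  | cons q R ih =>
    by_cases hp : p q
    · simp [pvSegs, hp, pvBody] at ih ⊢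
      exact ih
    · simp only [pvSegs, hp, Bool.false_eq_true, if_false]
      rcases hs : pvSegs p R with ⟨segs, last⟩
      cases segs with
      | nil =>
        simp only []
        rw [hs] at ih
        simp [pvBody] at ih ⊢
        exact ih
      | cons gy rest =>
        rcases gy with ⟨g, y⟩
        simp only []
        rw [hs] at ih
        simp [pvBody] at ih ⊢
        exact ih

theorem pvSegs_snd (p : (String × Int) → Bool) :
    ∀ R : List (String × Int), (pvSegs p R).1.map (fun gx => gx.2) = R.filter p := by
  intro R
  induction R with
  | nil => simp [pvSegs]
  | cons q R ih =>
    by_cases hp : p q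
    · simp [pvSegs, hp] at ih ⊢; exact ih
    · simp only [pvSegs, hp, Bool.false_eq_true, if_false, List.filter_cons]
      rcases hs : pvSegs p R with ⟨segs, last⟩
      rw [hs] at ih
      cases segs with
      | nil => simpa [hp] using ih
      | cons gy rest =>
        rcases gy with ⟨g, y⟩
        simpa [hp] using ih

theorem pvSegs_resid (p : (String × Int) → Bool) :
    ∀ R : List (String × Int),
      (pvSegs p R).1.flatMap (fun gx => gx.1) ++ (pvSegs p R).2 = R.filter (fun q => !p q) := by
  intro R
  induction R with
  | nil => simp [pvSegs]
  | cons q R ih =>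
    by_cases hp : p q
    · simp only [pvSegs, hp, if_pos, List.filter_cons, Bool.not_true]
      simpa [hp] using ih
    · simp only [pvSegs, hp, Bool.false_eq_true, if_false, List.filter_cons, Bool.not_false]
      rcases hs : pvSegs p R with ⟨segs, last⟩
      rw [hs] at ih
      cases segs with
      | nil => simpa [hp] using ih
      | cons gy rest =>
        rcases gy with ⟨g, y⟩
        simpa [hp] using ih

theorem pvEnumerateMap {α β : Type} (f : α → β) :
    ∀ (R : List α) (c : Int),
      PySem.List.enumerate (R.map f) c = (PySem.List.enumerate R c).map (fun q => (q.1, f q.2)) := by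
  intro R
  induction R with
  | nil => intro c; simp [PySem.List.enumerate]
  | cons q R ih =>
    intro c
    simp only [List.map_cons, PySem.List.enumerate_cons, ih (c + 1)]

theorem pvTSegs (P : (String × Int) → Bool) :
    ∀ (R : List (String × Int)) (c : Int),
      ((PySem.List.enumerate R c).filter (fun q => P q.2)).map (fun q => q.1 + 1)
        = pvPosList c (pvSegs P R).1 := by
  intro R
  induction R with
  | nil => intro c; simp [PySem.List.enumerate, pvSegs, pvPosList]
  | cons q R ih =>
    intro c
    by_cases hp : P q
    · simp only [PySem.List.enumerate_cons, List.filter_cons, hp, if_pos, List.map_cons,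
        pvSegs, pvPosList, ih (c + 1)]
      simp [pvPosList]
    · simp only [PySem.List.enumerate_cons, List.filter_cons, hp, Bool.false_eq_true, if_false,
        pvSegs]
      rcases hs : pvSegs P R with ⟨segs, last⟩
      have ih' := ih (c + 1)
      rw [hs] at ih'
      cases segs with
      | nil => simpa [pvPosList] using ih'
      | cons gy rest =>
        rcases gy with ⟨g, y⟩
        simp only [pvPosList]
        rw [ih']
        simp only [pvPosList]
        have hb : c + 1 + (g.length : Int) + 1 = c + ((q :: g).length : Int) + 1 := by
          push_cast [List.length_cons]; ring
        rw [hb]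


theorem pvMove (k logic ln : Int) (U : List (String × Int)) (x : String × Int) :
    ∀ (V W : List (String × Int)) (mS : List String),
    (PySem.List.pyRange ((U.length : Int) + (V.length : Int)) ((U.length : Int)) (-1)).foldl
        (pvStepA k logic)
        { es := (U ++ V ++ x :: W).map Prod.fst, fs := (U ++ V ++ x :: W).map Prod.snd,
          ln := ln, m := pvPad mS, n := (mS.length : Int) }
    = { es := (U ++ x :: (V ++ W)).map Prod.fst, fs := (U ++ x :: (V ++ W)).map Prod.snd,
        ln := ln,
        m := pvPad (mS ++ (PySem.List.pyRange ((U.length : Int) + (V.length : Int))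
              ((U.length : Int)) (-1)).map (pvSwapStr k logic)),
        n := (mS.length : Int) + (V.length : Int) } := by
  intro V
  induction V using List.reverseRecOn with
  | nil =>
    intro W mS
    rw [PySem.List.pyRange_neg_one_eq_nil (by simp)]
    simp
  | append_singleton V' y ih =>
    intro W mS
    have ha : ((U.length : Int) + ((V' ++ [y]).length : Int))
        = (((U ++ V').length : Int)) + 1 := by push_cast [List.length_append, List.length_cons, List.length_nil]; ring
    have hcons : PySem.List.pyRange ((((U ++ V').length : Int)) + 1) ((U.length : Int)) (-1)
        = ((((U ++ V').length : Int)) + 1) ::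
          PySem.List.pyRange ((((U ++ V').length : Int)) + 1 - 1) ((U.length : Int)) (-1) := by
      rw [PySem.List.pyRange_neg_one_cons (by push_cast [List.length_append, List.length_cons, List.length_nil]; omega)]
    have hz : U ++ (V' ++ [y]) ++ x :: W = (U ++ V') ++ y :: x :: W := by simp
    rw [ha, hz, hcons, List.foldl_cons]
    rw [pvStepA_eq k logic ln (U ++ V') y x W mS]
    have hrange1 : ((((U ++ V').length : Int)) + 1 - 1) = (U.length : Int) + (V'.length : Int) := by
      push_cast [List.length_append, List.length_nil]; ring
    have hzz : (U ++ V') ++ x :: y :: W = U ++ V' ++ x :: (y :: W) := by simp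
    have hn : ((mS.length : Int) + 1)
        = (((mS ++ [pvSwapStr k logic ((((U ++ V').length : Int)) + 1)]).length : Int)) := by
      simp
    rw [hn, hzz, hrange1, ih (y :: W) _]
    rw [PvStA.mk.injEq]
    refine ⟨by simp, by simp, rfl, by simp, by push_cast [List.length_append, List.length_cons, List.length_nil]; ring⟩

theorem pvInnerA (k logic : Int) (C0 : List (String × Int)) (t : List Int) (Rlast : List (String × Int)) :
    ∀ (segs : List (List (String × Int) × (String × Int)))
      (X G : List (String × Int)) (mS : List String),
      t.length = X.length + segs.length →
      t.drop X.length = pvPosList ((C0.length : Int) + (X.length : Int) + (G.length : Int)) segs →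
      (PySem.List.pyRange ((X.length : Int) + 1) ((t.length : Int) + 1)).foldl
        (fun stI i =>
          (PySem.List.pyRange (PySem.List.pyGetD t (i - 1) 0 - 1) (stI.ln + i - 1) (-1)).foldl
            (pvStepA k logic) stI)
        { es := (C0 ++ X ++ G ++ pvBody segs ++ Rlast).map Prod.fst,
          fs := (C0 ++ X ++ G ++ pvBody segs ++ Rlast).map Prod.snd,
          ln := (C0.length : Int), m := pvPad mS, n := (mS.length : Int) }
      = { es := (C0 ++ X ++ segs.map (fun gx => gx.2) ++ (G ++ segs.flatMap (fun gx => gx.1) ++ Rlast)).map Prod.fst,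
          fs := (C0 ++ X ++ segs.map (fun gx => gx.2) ++ (G ++ segs.flatMap (fun gx => gx.1) ++ Rlast)).map Prod.snd,
          ln := (C0.length : Int),
          m := pvPad (mS ++ pvStrs k logic ((C0.length : Int) + (X.length : Int) + (G.length : Int))
                ((C0.length : Int) + (X.length : Int)) segs),
          n := (mS.length : Int) + ((pvStrs k logic ((C0.length : Int) + (X.length : Int) + (G.length : Int))
                ((C0.length : Int) + (X.length : Int)) segs).length : Int) } := by
  intro segs
  induction segs with
  | nil =>
    intro X G mS hlen ht
    rw [PySem.List.pyRange_one_eq_nil (by rw [hlen]; simp)]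
    rw [List.foldl_nil, PvStA.mk.injEq]
    refine ⟨by simp [pvBody, pvStrs], by simp [pvBody, pvStrs], rfl, by simp [pvStrs], by simp [pvStrs]⟩
  | cons gx segs' ih =>
    rcases gx with ⟨g, x⟩
    intro X G mS hlen ht
    have hlt : ((X.length : Int) + 1) < ((t.length : Int) + 1) := by
      simp only [hlen, List.length_cons]; push_cast; omega
    rw [PySem.List.pyRange_one_cons hlt, List.foldl_cons]
    have hdrop : t.drop X.length
        = (((C0.length : Int) + (X.length : Int) + (G.length : Int)) + (g.length : Int) + 1) ::
          pvPosList (((C0.length : Int) + (X.length : Int) + (G.length : Int)) + (g.length : Int) + 1) segs' := by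
      rw [ht]; simp [pvPosList]
    have hget : PySem.List.pyGetD t ((X.length : Int) + 1 - 1) 0
        = ((C0.length : Int) + (X.length : Int) + (G.length : Int)) + (g.length : Int) + 1 := by
      rw [show ((X.length : Int) + 1 - 1) = ((X.length : Nat) : Int) from by ring,
        PySem.List.pyGetD_natCast]
      have h0 : (t.drop X.length)[0]? = some (((C0.length : Int) + (X.length : Int) + (G.length : Int)) + (g.length : Int) + 1) := by
        rw [hdrop]; rfl
      rw [List.getElem?_drop] at h0
      simp only [Nat.add_zero] at h0
      simp [List.getD, h0]
    rw [hget]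
    have hrange : PySem.List.pyRange
          (((C0.length : Int) + (X.length : Int) + (G.length : Int)) + (g.length : Int) + 1 - 1)
          ((C0.length : Int) + ((X.length : Int) + 1) - 1) (-1)
        = PySem.List.pyRange (((C0 ++ X).length : Int) + (((G ++ g).length : Int)))
            (((C0 ++ X).length : Int)) (-1) := by
      congr 1 <;> push_cast [List.length_append] <;> ring
    have hz : C0 ++ X ++ G ++ pvBody ((g, x) :: segs') ++ Rlast
        = (C0 ++ X) ++ (G ++ g) ++ x :: (pvBody segs' ++ Rlast) := by
      simp [pvBody]
    rw [hz, hrange, pvMove k logic (C0.length : Int) (C0 ++ X) x (G ++ g) (pvBody segs' ++ Rlast) mS]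
    have hlenStr : (((PySem.List.pyRange (((C0 ++ X).length : Int) + (((G ++ g).length : Int)))
        (((C0 ++ X).length : Int)) (-1)).map (pvSwapStr k logic)).length : Int) = ((G ++ g).length : Int) := by
      rw [List.length_map, PySem.List.length_pyRange_neg_one]
      omega
    have hnA : ((mS.length : Int) + (((G ++ g).length : Int)))
        = (((mS ++ (PySem.List.pyRange (((C0 ++ X).length : Int) + (((G ++ g).length : Int)))
            (((C0 ++ X).length : Int)) (-1)).map (pvSwapStr k logic)).length : Int)) := by
      rw [show (((mS ++ (PySem.List.pyRange (((C0 ++ X).length : Int) + (((G ++ g).length : Int)))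
            (((C0 ++ X).length : Int)) (-1)).map (pvSwapStr k logic)).length : Nat) : Int)
          = (mS.length : Int) + (((PySem.List.pyRange (((C0 ++ X).length : Int) + (((G ++ g).length : Int)))
            (((C0 ++ X).length : Int)) (-1)).map (pvSwapStr k logic)).length : Int) from by
        push_cast [List.length_append]; ring]
      rw [hlenStr]
    have hesA : (C0 ++ X) ++ x :: ((G ++ g) ++ (pvBody segs' ++ Rlast))
        = C0 ++ (X ++ [x]) ++ (G ++ g) ++ pvBody segs' ++ Rlast := by simp
    have hidx : ((X.length : Int) + 1 + 1) = (((X ++ [x]).length : Int)) + 1 := by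
      push_cast [List.length_append, List.length_cons, List.length_nil]
      ring
    have hlen' : t.length = (X ++ [x]).length + segs'.length := by
      rw [hlen]
      simp
      omega
    have ht' : t.drop (X ++ [x]).length
        = pvPosList ((C0.length : Int) + (((X ++ [x]).length : Int)) + (((G ++ g).length : Int))) segs' := by
      have hdd : t.drop (X ++ [x]).length = (t.drop X.length).drop 1 := by
        rw [List.drop_drop]
        congr 1
        simp [Nat.add_comm]
      rw [hdd, hdrop]
      simp only [List.drop_one, List.tail_cons]
      congr 1
      push_cast [List.length_append, List.length_cons, List.length_nil]
      ring
    rw [hnA, hesA, hidx, ih (X ++ [x]) (G ++ g) _ hlen' ht']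
    rw [PvStA.mk.injEq]
    have hbase : ((C0.length : Int) + (((X ++ [x]).length : Int)) + (((G ++ g).length : Int)))
        = ((C0.length : Int) + (X.length : Int) + (G.length : Int)) + (g.length : Int) + 1 := by
      push_cast [List.length_append, List.length_cons, List.length_nil]
      ring
    have hd1 : ((C0.length : Int) + (((X ++ [x]).length : Int)))
        = ((C0.length : Int) + (X.length : Int)) + 1 := by
      push_cast [List.length_append, List.length_cons, List.length_nil]
      ring
    have hstart : (((C0 ++ X).length : Int) + (((G ++ g).length : Int)))
        = ((C0.length : Int) + (X.length : Int) + (G.length : Int)) + (g.length : Int) := by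
      push_cast [List.length_append]
      ring
    have hstop : (((C0 ++ X).length : Int)) = ((C0.length : Int) + (X.length : Int)) := by
      push_cast [List.length_append]
      ring
    have hm : (mS ++ (PySem.List.pyRange (((C0 ++ X).length : Int) + (((G ++ g).length : Int)))
          (((C0 ++ X).length : Int)) (-1)).map (pvSwapStr k logic))
          ++ pvStrs k logic ((C0.length : Int) + (((X ++ [x]).length : Int)) + (((G ++ g).length : Int)))
            ((C0.length : Int) + (((X ++ [x]).length : Int))) segs'
        = mS ++ pvStrs k logic ((C0.length : Int) + (X.length : Int) + (G.length : Int))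
            ((C0.length : Int) + (X.length : Int)) ((g, x) :: segs') := by
      rw [hbase, hd1, hstart, hstop]
      simp [pvStrs]
    refine ⟨by simp, by simp, rfl, ?_, ?_⟩
    · rw [← hm]
    · have := congrArg (fun l => ((List.length l : Nat) : Int)) hm
      simp only [List.length_append, Nat.cast_add] at this ⊢
      omega

def pvPos0 : Int → List (List (String × Int) × (String × Int)) → List Int
  | _, [] => []
  | base, (g, _) :: segs => (base + g.length) :: pvPos0 (base + g.length + 1) segs

theorem pvPosList_length : ∀ (segs : List (List (String × Int) × (String × Int))) (c : Int),
    (pvPosList c segs).length = segs.length := by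
  intro segs
  induction segs with
  | nil => intro c; rfl
  | cons gx segs ih =>
    rcases gx with ⟨g, x⟩
    intro c
    simp only [pvPosList, List.length_cons, ih]

theorem pvPos0_length : ∀ (segs : List (List (String × Int) × (String × Int))) (c : Int),
    (pvPos0 c segs).length = segs.length := by
  intro segs
  induction segs with
  | nil => intro c; rfl
  | cons gx segs ih =>
    rcases gx with ⟨g, x⟩
    intro c
    simp only [pvPos0, List.length_cons, ih]

theorem pvTSegs0 (P : (String × Int) → Bool) :
    ∀ (R : List (String × Int)) (c : Int),
      ((PySem.List.enumerate R c).filter (fun q => P q.2)).map (fun q => q.1)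
        = pvPos0 c (pvSegs P R).1 := by
  intro R
  induction R with
  | nil => intro c; simp [PySem.List.enumerate, pvSegs, pvPos0]
  | cons q R ih =>
    intro c
    by_cases hp : P q
    · simp only [PySem.List.enumerate_cons, List.filter_cons, hp, if_pos, List.map_cons,
        pvSegs, ih (c + 1), pvPos0]
      norm_num
    · simp only [PySem.List.enumerate_cons, List.filter_cons, hp, Bool.false_eq_true, if_false,
        pvSegs]
      rcases hs : pvSegs P R with ⟨segs, last⟩
      have ih' := ih (c + 1)
      rw [hs] at ih'
      cases segs with
      | nil => simpa [pvPos0] using ih'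
      | cons gy rest =>
        rcases gy with ⟨g, y⟩
        simp only [pvPos0]
        rw [ih']
        simp only [pvPos0]
        have hb : c + 1 + (g.length : Int) = c + ((q :: g).length : Int) := by
          push_cast [List.length_cons]; ring
        rw [hb]

theorem pvInnerB (k logic ln : Int) :
    ∀ (segs : List (List (String × Int) × (String × Int))) (b i0 : Int) (m0 : List String),
      (PySem.List.enumerate (pvPos0 b segs) i0).foldl
        (fun mm ip => mm ++ (PySem.List.pyRange (ln + ip.2) (ln + ip.1 - 1) (-1)).map
          (fun j => pvSwapStr k logic j)) m0
      = m0 ++ pvStrs k logic (ln + b) (ln + i0 - 1) segs := by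
  intro segs
  induction segs with
  | nil => intro b i0 m0; simp [pvPos0, pvStrs, PySem.List.enumerate]
  | cons gx segs ih =>
    rcases gx with ⟨g, x⟩
    intro b i0 m0
    simp only [pvPos0, PySem.List.enumerate_cons, List.foldl_cons]
    rw [ih (b + g.length + 1) (i0 + 1) _]
    simp only [pvStrs]
    have h1 : ln + (b + (g.length : Int)) = ln + b + (g.length : Int) := by ring
    have h2 : ln + (b + (g.length : Int) + 1) = ln + b + (g.length : Int) + 1 := by ring
    have h3 : ln + (i0 + 1) - 1 = ln + i0 - 1 + 1 := by ring
    rw [h1, h2, h3, List.append_assoc]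

def pvRem (nz : List (String × Int)) (s : Int) : List (String × Int) :=
  nz.filter (fun p => !(decide (1 ≤ p.2) && decide (p.2 < s)))

def pvLift (nz : List (String × Int)) (s : Int) (stB : PvStB) : PvStA :=
  { es := (stB.buckets ++ pvRem nz s).map Prod.fst,
    fs := (stB.buckets ++ pvRem nz s).map Prod.snd,
    ln := (stB.buckets.length : Int), m := pvPad stB.m, n := (stB.m.length : Int) }

theorem pvRemStep (nz : List (String × Int)) (s : Int) (hs : 1 ≤ s) :
    pvRem nz (s + 1) = (pvRem nz s).filter (fun q => !(q.2 == s)) := by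
  rw [pvRem, pvRem, List.filter_filter]
  apply List.filter_congr
  intro p _
  rw [Bool.eq_iff_iff]
  simp
  omega

theorem pvEnumFilterNil (C : List (String × Int)) (s : Int)
    (hCv : ∀ p ∈ C, ¬ p.2 = s) (c : Int) :
    (PySem.List.enumerate C c).filter (fun q => q.2.2 == s) = [] := by
  apply List.filter_eq_nil_iff.mpr
  intro q hq
  rcases (PySem.List.mem_enumerate_iff _ _ _).mp hq with ⟨kk, hk, rfl⟩
  simpa using hCv _ (List.getElem_mem hk)

theorem pvStepS (k logic : Int) (nz : List (String × Int)) (s : Int) (hs : 1 ≤ s)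
    (stB : PvStB) (hln : stB.ln = (stB.buckets.length : Int))
    (hCv : ∀ p ∈ stB.buckets, 1 ≤ p.2 ∧ p.2 < s) :
    pvOuterA k logic (pvLift nz s stB) s = pvLift nz (s + 1) (pvOuterB nz k logic stB s)
    ∧ (pvOuterB nz k logic stB s).ln = (((pvOuterB nz k logic stB s).buckets.length : Nat) : Int)
    ∧ (pvOuterB nz k logic stB s).buckets
        = stB.buckets ++ (pvRem nz s).filter (fun q => q.2 == s) := by
  rcases stB with ⟨mS, lnB, C⟩
  simp only [] at hln hCv
  subst hln
  have hsegsBody := pvSegs_body (fun q => q.2 == s) (pvRem nz s)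
  have hsegsSnd := pvSegs_snd (fun q => q.2 == s) (pvRem nz s)
  have hsegsResid := pvSegs_resid (fun q => q.2 == s) (pvRem nz s)
  set segs := (pvSegs (fun q => q.2 == s) (pvRem nz s)).1 with hsegs
  set last := (pvSegs (fun q => q.2 == s) (pvRem nz s)).2 with hlast
  have ht : (((PySem.List.enumerate ((C ++ pvRem nz s).map Prod.snd)).filter
        (fun idx => idx.2 == s)).map (fun idx => idx.1 + 1))
      = pvPosList ((C.length : Nat) : Int) segs := by
    rw [pvEnumerateMap Prod.snd (C ++ pvRem nz s) 0, List.filter_map, List.map_map]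
    have hcomp : ((PySem.List.enumerate (C ++ pvRem nz s)).filter
          ((fun (idx : Int × Int) => idx.2 == s) ∘ (fun q => (q.1, q.2.2)))).map
          ((fun (idx : Int × Int) => idx.1 + 1) ∘ (fun q => (q.1, q.2.2)))
        = ((PySem.List.enumerate (C ++ pvRem nz s)).filter
          (fun q => q.2.2 == s)).map (fun q => q.1 + 1) := rfl
    rw [hcomp, PySem.List.enumerate_append, List.filter_append,
      pvEnumFilterNil C s (fun p hp => by have := hCv p hp; omega) 0, List.nil_append,
      zero_add, pvTSegs (fun q => q.2 == s) (pvRem nz s) ((C.length : Nat) : Int)]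
  have hpos : (((PySem.List.enumerate (pvRem nz s)).filter
        (fun q => q.2.2 == s)).map (fun q => q.1)) = pvPos0 0 segs :=
    pvTSegs0 (fun q => q.2 == s) (pvRem nz s) 0
  have hfl : ((pvRem nz s).filter (fun q => q.2 == s)).length = segs.length := by
    rw [← hsegsSnd, List.length_map]
  refine ⟨?_, ?_, ?_⟩
  · -- main simulation equation
    have HI := pvInnerA k logic C (pvPosList ((C.length : Nat) : Int) segs) last segs [] [] mS
      (by simp [pvPosList_length]) (by simp)
    simp only [List.length_nil, Nat.cast_zero, zero_add, add_zero, List.append_nil,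
      List.nil_append] at HI
    rw [pvOuterA, pvLift, pvLift, pvOuterB]
    simp only [ht, pvPosList_length]
    rw [show List.filter (fun p => !(decide (1 ≤ p.2) && decide (p.2 < s))) nz = pvRem nz s from rfl]
    simp only [hpos]
    rw [pvInnerB k logic ((C.length : Nat) : Int) segs 0 1 mS]
    simp only [pvPosList_length] at HI
    rw [show C ++ pvBody segs ++ last = C ++ pvRem nz s from by
      rw [List.append_assoc, hsegsBody]] at HI
    rw [HI]
    simp only []
    rw [hsegsSnd, hsegsResid, ← pvRemStep nz s hs]
    rw [PvStA.mk.injEq]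
    have ha0 : (C.length : Int) + 0 = (C.length : Int) := by ring
    have ha1 : (C.length : Int) + 1 - 1 = (C.length : Int) := by ring
    refine ⟨rfl, rfl, ?_, ?_, ?_⟩
    · push_cast [List.length_append]
      rw [hfl]
    · rw [ha0, ha1]
    · rw [ha0, ha1]
      push_cast [List.length_append]
      ring
  · rw [pvOuterB]
    rw [show List.filter (fun p => !(decide (1 ≤ p.2) && decide (p.2 < s))) nz = pvRem nz s from rfl]
    simp only [hpos]
    rw [pvPos0_length]
    push_cast [List.length_append]
    rw [hfl]
  · rfl

theorem pvLoops (k logic : Int) (nz : List (String × Int)) :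
    ∀ (cnt : Nat) (s0 : Int), 1 ≤ s0 → ∀ (stB : PvStB),
      stB.ln = (stB.buckets.length : Int) →
      (∀ p ∈ stB.buckets, 1 ≤ p.2 ∧ p.2 < s0) →
      (PySem.List.pyRange s0 (s0 + (cnt : Int))).foldl (pvOuterA k logic) (pvLift nz s0 stB)
        = pvLift nz (s0 + (cnt : Int)) ((PySem.List.pyRange s0 (s0 + (cnt : Int))).foldl (pvOuterB nz k logic) stB)
      ∧ ((PySem.List.pyRange s0 (s0 + (cnt : Int))).foldl (pvOuterB nz k logic) stB).ln
          = ((((PySem.List.pyRange s0 (s0 + (cnt : Int))).foldl (pvOuterB nz k logic) stB).buckets.length : Nat) : Int)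
      ∧ (∀ p ∈ ((PySem.List.pyRange s0 (s0 + (cnt : Int))).foldl (pvOuterB nz k logic) stB).buckets,
          1 ≤ p.2 ∧ p.2 < s0 + (cnt : Int))
      ∧ (∀ p ∈ nz, 1 ≤ p.2 → p.2 < s0 + (cnt : Int) →
          (∀ q ∈ nz, 1 ≤ q.2 → q.2 < s0 → q ∈ stB.buckets) →
          p ∈ ((PySem.List.pyRange s0 (s0 + (cnt : Int))).foldl (pvOuterB nz k logic) stB).buckets) := by
  intro cnt
  induction cnt with
  | zero =>
    intro s0 hs stB hln hCv
    rw [PySem.List.pyRange_one_eq_nil (by simp)]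
    simp only [List.foldl_nil]
    refine ⟨by norm_num, hln, by simpa using hCv, ?_⟩
    intro p hp h1 h2 hall
    exact hall p hp h1 (by simpa using h2)
  | succ cnt ih =>
    intro s0 hs stB hln hCv
    have hsplit : (s0 + ((cnt + 1 : Nat) : Int)) = (s0 + 1) + (cnt : Int) := by push_cast; ring
    rw [hsplit, PySem.List.pyRange_one_cons (by omega), List.foldl_cons, List.foldl_cons]
    rcases pvStepS k logic nz s0 hs stB hln hCv with ⟨hA, hln', hbk⟩
    have hCv' : ∀ p ∈ (pvOuterB nz k logic stB s0).buckets, 1 ≤ p.2 ∧ p.2 < s0 + 1 := by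
      intro p hp
      rw [hbk] at hp
      rcases List.mem_append.mp hp with hp | hp
      · have := hCv p hp; omega
      · rcases List.mem_filter.mp hp with ⟨-, hv⟩
        have : p.2 = s0 := by simpa using hv
        omega
    rw [hA]
    rcases ih (s0 + 1) (by omega) (pvOuterB nz k logic stB s0) hln' hCv' with ⟨e1, e2, e3, e4⟩
    refine ⟨e1, e2, by intro p hp; have := e3 p hp; omega, ?_⟩
    intro p hp h1 h2 hall
    refine e4 p hp h1 (by omega) ?_
    intro q hq hq1 hq2
    rw [hbk]
    rcases lt_or_ge q.2 s0 with hlt | hge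
    · exact List.mem_append_left _ (hall q hq hq1 hlt)
    · have hq2' : q.2 = s0 := by omega
      apply List.mem_append_right
      apply List.mem_filter.mpr
      refine ⟨List.mem_filter.mpr ⟨hq, ?_⟩, by simpa using hq2'⟩
      simp only [Bool.not_eq_eq_eq_not, Bool.not_true, Bool.and_eq_false_iff]
      simp [hq2']

theorem pvPadTake (l : List String) : (pvPad l).take l.length = l := by
  cases l <;> simp [pvPad]

theorem pvMapConstZero (c : Int) :
    (PySem.List.pyRange 0 c).map (fun _ => (0 : Int)) = List.replicate c.toNat 0 := by
  refine List.eq_replicate_iff.mpr ⟨?_, ?_⟩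
  · rw [List.length_map, PySem.List.length_pyRange_one]
    simp
  · intro b hb
    rcases List.mem_map.mp hb with ⟨_, -, rfl⟩
    rfl

theorem pvZf0Snd (es : List String) (fs : List Int) :
    ((es.zip fs).filter (fun q => q.2 == 0)).map (fun q => q.2)
      = List.replicate ((es.zip fs).filter (fun q => q.2 == 0)).length 0 := by
  refine List.eq_replicate_iff.mpr ⟨by simp, ?_⟩
  intro b hb
  rcases List.mem_map.mp hb with ⟨q, hq, rfl⟩
  have := (List.mem_filter.mp hq).2
  simpa using this

theorem pvMain (expressions : List String) (f : List Int) (logic : Int)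
    (hlen : f.length ≤ expressions.length) (hpos : ∃ x ∈ f, 0 < x) :
    swap_vars_by_order expressions f logic = swap_vars_by_order_alt expressions f logic := by
  simp only [swap_vars_by_order, swap_vars_by_order_alt]
  rw [pvVClosed f, pvShift expressions "" _, pvShift f 0 _, pvPositionsClosed f,
    pvShift0 expressions "" _, pvShift0 f 0 _,
    pvCoreFst (fun v => v == 0) "" 0 f expressions hlen,
    pvCoreSnd (fun v => v == 0) "" 0 f expressions hlen,
    pvCoreFst (fun v => !(v == 0)) "" 0 f expressions hlen,
    pvCoreSnd (fun v => !(v == 0)) "" 0 f expressions hlen]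
  set zf0 := (expressions.zip f).filter (fun q => q.2 == 0) with hzf0
  set nz := (expressions.zip f).filter (fun q => !(q.2 == 0)) with hnzdef
  -- the maximum m of the nonzero order values
  obtain ⟨x, hxf, hx0⟩ := hpos
  have hsndzip : (expressions.zip f).map Prod.snd = f := List.map_snd_zip hlen
  have hxnz : x ∈ nz.map (fun q => q.2) := by
    rcases List.mem_map.mp (hsndzip ▸ hxf) with ⟨p, hp, hpx⟩
    exact List.mem_map.mpr ⟨p, List.mem_filter.mpr ⟨hp, by simp [hpx]; omega⟩, hpx⟩
  cases hmx : PySem.List.max? (nz.map (fun q => q.2)) (fun x => x) with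
  | none =>
    rw [PySem.List.max?_eq_none_iff] at hmx
    rw [hmx] at hxnz
    exact absurd hxnz (List.not_mem_nil)
  | some m =>
  have hm1 : 1 ≤ m := by
    have := PySem.List.max?_isMax hmx x hxnz
    omega
  have hvle : ∀ p ∈ nz, p.2 ≤ m := fun p hp =>
    PySem.List.max?_isMax hmx p.2 (List.mem_map.mpr ⟨p, hp, rfl⟩)
  simp only [Option.getD_some]
  rw [show m + 1 = 1 + ((m.toNat : Nat) : Int) from by omega]
  have hrem1 : pvRem nz 1 = nz := List.filter_eq_self.mpr (fun p _ => by simp; omega)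
  have hinit : (⟨nz.map (fun q => q.1), nz.map (fun q => q.2), 0, [""], 0⟩ : PvStA)
      = pvLift nz 1 ⟨[], 0, []⟩ := by
    rw [pvLift, hrem1]
    simp [pvPad]
  rw [hinit]
  rcases pvLoops logic logic nz m.toNat 1 (by omega) ⟨[], 0, []⟩ (by simp) (by simp)
    with ⟨hAB, hlnB, hCvB, hmemB⟩
  rw [hAB]
  set B' := (PySem.List.pyRange 1 (1 + ((m.toNat : Nat) : Int))).foldl (pvOuterB nz logic logic)
      (⟨[], 0, []⟩ : PvStB) with hB'
  simp only [pvLift]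
  obtain ⟨pm, hpmnz, hpm2⟩ : ∃ pm ∈ nz, pm.2 = m := by
    rcases List.mem_map.mp (PySem.List.max?_mem hmx) with ⟨pm, hpm, hpm2⟩
    exact ⟨pm, hpm, hpm2⟩
  have hpmB : pm ∈ B'.buckets :=
    hmemB pm hpmnz (by omega) (by omega) (fun q hq h1 h2 => absurd h2 (by omega))
  have hbpos : 0 < B'.buckets.length := List.length_pos_of_mem hpmB
  have hremEq : pvRem nz (1 + ((m.toNat : Nat) : Int)) = nz.filter (fun p => decide (p.2 < 1)) := by
    rw [pvRem]
    apply List.filter_congr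
    intro p hp
    have := hvle p hp
    rw [Bool.eq_iff_iff]
    simp
    omega
  have hs1 : List.take (((List.map (fun q => q.2) zf0).length : Int)).toNat
      (List.map (fun q => q.1) zf0) = List.map (fun q => q.1) zf0 := by
    simp
  have hs2 : List.drop (((List.map (fun q => q.2) zf0).length : Int) + (B'.m.length : Int)).toNat
      (List.map (fun q => q.1) zf0) = [] := by
    apply List.drop_eq_nil_of_le
    simp only [List.length_map]
    omega
  have hs3 : List.take (((List.map (fun q => q.2) zf0).length : Int) + (B'.m.length : Int)).toNat
      (List.map (fun q => q.1) zf0 ++ pvPad B'.m) = List.map (fun q => q.1) zf0 ++ B'.m := by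
    rw [show (((List.map (fun q => q.2) zf0).length : Int) + (B'.m.length : Int)).toNat
        = (List.map (fun q => q.1) zf0).length + B'.m.length from by
      simp only [List.length_map]; omega]
    rw [List.take_append, List.take_of_length_le (by omega), Nat.add_sub_cancel_left, pvPadTake]
  have hpadle : (pvPad B'.m).length ≤ B'.m.length + B'.buckets.length := by
    cases hsm : B'.m with
    | nil => simpa [pvPad, hsm] using hbpos
    | cons a l => simp [pvPad]
  have hs4 : List.drop ((((List.map (fun q => q.2) zf0).length : Int) + (B'.m.length : Int))
        + (B'.buckets.length : Int)).toNat
      (List.map (fun q => q.1) zf0 ++ pvPad B'.m) = [] := by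
    apply List.drop_eq_nil_of_le
    simp only [List.length_append, List.length_map]
    omega
  rw [hs1, hs2, List.append_nil, hs3, hs4, hremEq]
  have h5 : List.map (fun q => q.2) zf0 = List.replicate zf0.length 0 := by
    rw [hzf0]
    exact pvZf0Snd expressions f
  rw [Prod.mk.injEq]
  constructor
  · rw [List.append_nil]
  · rw [h5, pvMapConstZero, PySem.List.pyRepeat_singleton, PySem.List.pyRepeat_singleton]
    simp

-- ===== VERDICT (by name: the statement is the Claim_ definition above) =====
theorem swap_vars_by_order_spec : Claim_equal_swap_vars_by_order := by
  intro expressions f logic hdom hpre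
  unfold Pre_swap_vars_by_order at hpre
  unfold Spec_swap_vars_by_order
  exact pvMain expressions f logic hpre.1 hpre.2
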